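-- pv_equiv track=rewrite | github.com/Nghia03092004/nghia03092004.github.io | project_euler_unified/problem_950/solution.py | solve
-- ===== SOURCE A (Python) =====
-- from itertools import product
--
-- MOD = 10 ** 9 + 7
--
-- def valid_column_colorings(rows, k):
--     """Generate all proper colorings of a path graph on 'rows' vertices
--     using k colors. Adjacent vertices must have different colors."""
--     colors = list(range(k))
--     result = []
--     for col in product(colors, repeat=rows):
--         if all(col[i] != col[i + 1] for i in range(rows - 1)):
--             result.append(col)
--     return result
--
-- def build_transfer_matrix(valid_cols, rows):
--     """Build compatibility matrix: T[i][j]=1 iff col i and col j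
--     have different colors in every row."""
--     C = len(valid_cols)
--     T = [[0] * C for _ in range(C)]
--     for i, c1 in enumerate(valid_cols):
--         for j, c2 in enumerate(valid_cols):
--             if all(c1[r] != c2[r] for r in range(rows)):
--                 T[i][j] = 1
--     return T
--
-- def mat_mul(A, B, mod):
--     n = len(A)
--     R = [[0] * n for _ in range(n)]
--     for i in range(n):
--         for kk in range(n):
--             if A[i][kk] == 0:
--                 continue
--             for jj in range(n):
--                 R[i][jj] = (R[i][jj] + A[i][kk] * B[kk][jj]) % mod
--     return R
--
-- def mat_pow(M, p, mod):
--     n = len(M)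
--     R = [[1 if i == j else 0 for j in range(n)] for i in range(n)]
--     while p > 0:
--         if p & 1:
--             R = mat_mul(R, M, mod)
--         M = mat_mul(M, M, mod)
--         p >>= 1
--     return R
--
-- def solve(rows, cols, k, mod=MOD):
--     """Compute P(G_{rows x cols}, k) mod mod."""
--     valid_cols = valid_column_colorings(rows, k)
--     T = build_transfer_matrix(valid_cols, rows)
--     Tn = mat_pow(T, cols - 1, mod)
--     C = len(valid_cols)
--     ans = 0
--     for i in range(C):
--         for j in range(C):
--             ans = (ans + Tn[i][j]) % mod
--     return ans
-- ===== SOURCE B (Python) =====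
-- from itertools import product
--
-- MOD = 10 ** 9 + 7
--
-- def valid_column_colorings(rows, k):
--     """Generate all proper colorings of a path graph on 'rows' vertices
--     using k colors. Adjacent vertices must have different colors."""
--     colors = list(range(k))
--     result = []
--     for col in product(colors, repeat=rows):
--         if all(col[i] != col[i + 1] for i in range(rows - 1)):
--             result.append(col)
--     return result
--
-- def build_transfer_matrix(valid_cols, rows):
--     """Build compatibility matrix: T[i][j]=1 iff col i and col j
--     have different colors in every row."""
--     C = len(valid_cols)
--     T = [[0] * C for _ in range(C)]
--     for i, c1 in enumerate(valid_cols):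
--         for j, c2 in enumerate(valid_cols):
--             if all(c1[r] != c2[r] for r in range(rows)):
--                 T[i][j] = 1
--     return T
--
-- def _vec_mat(v, M, mod):
--     """Row vector times matrix, entries reduced mod 'mod'."""
--     C = len(v)
--     return [sum(v[i] * M[i][j] for i in range(C)) % mod for j in range(C)]
--
-- def _mat_sq(M, mod):
--     """Square of M, entries reduced mod 'mod'."""
--     C = len(M)
--     return [[sum(M[i][t] * M[t][j] for t in range(C)) % mod
--              for j in range(C)] for i in range(C)]
--
-- def _pow_apply(v, M, p, mod):
--     """v . M**p (mod 'mod') by binary exponentiation on the vector."""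
--     if p <= 0:
--         return v
--     if p & 1:
--         v = _vec_mat(v, M, mod)
--     return _pow_apply(v, _mat_sq(M, mod), p >> 1, mod)
--
-- def solve(rows, cols, k, mod=MOD):
--     """Compute P(G_{rows x cols}, k) mod mod."""
--     valid_cols = valid_column_colorings(rows, k)
--     T = build_transfer_matrix(valid_cols, rows)
--     v = _pow_apply([1] * len(valid_cols), T, cols - 1, mod)
--     return sum(v) % mod
-- ===== Notes on version B (the rewrite author's own statement) =====
-- stated objective: alternative
-- what changed: Keeps the column colorings and transfer matrix but replaces identity-seeded binary matrix powering (mat_pow/mat_mul with per-step mods and zero-skip) plus a final double sum by recursive binary exponentiation applied to the all-ones row vector: vector-matrix products on odd bits, comprehension-style squaring, and a single final sum.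
-- outside the precondition, e.g. on solve(1, 1, 0, 0): A returns 0, B raises ZeroDivisionError
import Mathlib
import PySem

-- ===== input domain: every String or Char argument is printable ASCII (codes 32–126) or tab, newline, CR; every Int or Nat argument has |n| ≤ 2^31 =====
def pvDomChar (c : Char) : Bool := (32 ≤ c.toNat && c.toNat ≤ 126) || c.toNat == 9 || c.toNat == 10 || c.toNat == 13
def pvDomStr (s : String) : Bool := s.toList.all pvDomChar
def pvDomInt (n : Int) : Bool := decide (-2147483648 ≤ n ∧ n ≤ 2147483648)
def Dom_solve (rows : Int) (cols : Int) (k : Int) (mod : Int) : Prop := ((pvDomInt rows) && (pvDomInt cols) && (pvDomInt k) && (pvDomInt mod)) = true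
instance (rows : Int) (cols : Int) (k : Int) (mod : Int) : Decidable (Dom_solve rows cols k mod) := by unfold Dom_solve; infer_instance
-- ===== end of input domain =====

-- B keeps A's column-coloring list and transfer matrix but replaces identity-seeded binary
-- matrix powering plus a final double sum by binary exponentiation applied directly to the
-- all-ones row vector (objective: alternative; same asymptotics, smaller accumulator work).

-- ===== PORT A =====
-- in-range 2-D read R[i][j] (all indices below are provably 0 ≤ i < len, where Python indexing is plain)
def pvE (M : List (List Int)) (i j : Nat) : Int := (M.getD i []).getD j 0
-- in-range 2-D write R[i][j] = x
def pvSet2 (M : List (List Int)) (i j : Nat) (x : Int) : List (List Int) :=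
  M.set i ((M.getD i []).set j x)

-- itertools.product(colors, repeat=n), leftmost factor varies slowest (Python's order)
def pvProdRep (colors : List Int) : Nat → List (List Int)
  | 0 => [[]]
  | n+1 => colors.flatMap (fun x => (pvProdRep colors n).map (fun t => x :: t))

-- valid_column_colorings (shared text in Source A and Source B; used by both ports)
def pvValidCols (rows k : Int) : List (List Int) :=
  let colors := (List.range k.toNat).map (fun x => (x : Int))
  (pvProdRep colors rows.toNat).filter (fun col =>
    (List.range (rows - 1).toNat).all (fun i => col.getD i 0 != col.getD (i+1) 0))

-- build_transfer_matrix (shared text in Source A and Source B; enumerate ported as an index loop)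
def pvBuildT (vc : List (List Int)) (rows : Int) : List (List Int) :=
  let C := vc.length
  (List.range C).foldl (fun T i =>
    (List.range C).foldl (fun T j =>
      if (List.range rows.toNat).all
          (fun r => (vc.getD i []).getD r 0 != (vc.getD j []).getD r 0)
      then pvSet2 T i j 1 else T) T)
    (List.replicate C (List.replicate C 0))

-- mat_mul
def pvMatMul (A B : List (List Int)) (m : Int) : List (List Int) :=
  let n := A.length
  (List.range n).foldl (fun R i =>
    (List.range n).foldl (fun R kk =>
      if pvE A i kk == 0 then R
      else (List.range n).foldl (fun R jj =>
        pvSet2 R i jj (PySem.Int.mod (pvE R i jj + pvE A i kk * pvE B kk jj) m)) R) R)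
    (List.replicate n (List.replicate n 0))

-- the while-loop of mat_pow
def pvMatPowGo (R M : List (List Int)) (p m : Int) : List (List Int) :=
  if _h : 0 < p then
    pvMatPowGo (if PySem.Int.band p 1 != 0 then pvMatMul R M m else R)
      (pvMatMul M M m) (p >>> (1:Nat)) m
  else R
termination_by p.toNat
decreasing_by
  simp only [Int.shiftRight_eq_div_pow, pow_one]
  omega

-- mat_pow
def pvMatPow (M : List (List Int)) (p m : Int) : List (List Int) :=
  pvMatPowGo ((List.range M.length).map (fun i =>
    (List.range M.length).map (fun j => if i = j then (1:Int) else 0))) M p m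

def solve (rows : Int) (cols : Int) (k : Int) (mod : Int) : Int :=
  let vc := pvValidCols rows k
  let T := pvBuildT vc rows
  let Tn := pvMatPow T (cols - 1) mod
  let C := vc.length
  (List.range C).foldl (fun ans i =>
    (List.range C).foldl (fun ans j => PySem.Int.mod (ans + pvE Tn i j) mod) ans) 0

-- ===== PORT B =====
-- _vec_mat: row vector times matrix, entries reduced mod m
def pvVecMat (v : List Int) (M : List (List Int)) (m : Int) : List Int :=
  let C := v.length
  (List.range C).map (fun j =>
    PySem.Int.mod (((List.range C).map (fun i => v.getD i 0 * pvE M i j)).sum) m)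

-- _mat_sq: square of M, entries reduced mod m
def pvMatSq (M : List (List Int)) (m : Int) : List (List Int) :=
  let C := M.length
  (List.range C).map (fun i => (List.range C).map (fun j =>
    PySem.Int.mod (((List.range C).map (fun t => pvE M i t * pvE M t j)).sum) m))

-- _pow_apply: v · M^p (mod m) by binary exponentiation on the vector
def pvPowApply (v : List Int) (M : List (List Int)) (p m : Int) : List Int :=
  if _h : p ≤ 0 then v
  else pvPowApply (if PySem.Int.band p 1 != 0 then pvVecMat v M m else v)
    (pvMatSq M m) (p >>> (1:Nat)) m
termination_by p.toNat
decreasing_by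
  simp only [Int.shiftRight_eq_div_pow, pow_one]
  omega

def solve_alt (rows : Int) (cols : Int) (k : Int) (mod : Int) : Int :=
  let vc := pvValidCols rows k
  let T := pvBuildT vc rows
  let v := pvPowApply (List.replicate vc.length 1) T (cols - 1) mod
  PySem.Int.mod v.sum mod

-- ===== PRECONDITION & SPEC =====
-- Pre_ excludes rows < 0, where Python A raises ValueError (product(..., repeat=rows)), and
-- mod = 0, where A's '% mod' raises ZeroDivisionError — except the accidental corner with no
-- valid colorings (k ≤ 0 < rows), where the reductions are skipped and A returns 0 while B's
-- final 'sum(v) % mod' still raises; that corner is excluded with the same mod ≠ 0 clause.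
def Pre_solve (rows : Int) (cols : Int) (k : Int) (mod : Int) : Prop :=
  0 ≤ rows ∧ mod ≠ 0
instance (rows : Int) (cols : Int) (k : Int) (mod : Int) : Decidable (Pre_solve rows cols k mod) := by unfold Pre_solve; infer_instance
def pvWitness_solve : Int × Int × Int × Int := (2, 3, 2, 97)

def Spec_solve (rows : Int) (cols : Int) (k : Int) (mod : Int) (out : Int) : Prop := out = solve_alt rows cols k mod
instance (rows : Int) (cols : Int) (k : Int) (mod : Int) (out : Int) : Decidable (Spec_solve rows cols k mod out) := by unfold Spec_solve; infer_instance

-- ===== CLAIM (what is proved, stated in full; the proofs are below) =====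
def Claim_equal_solve : Prop := ∀ (rows : Int) (cols : Int) (k : Int) (mod : Int), Dom_solve rows cols k mod → Pre_solve rows cols k mod → Spec_solve rows cols k mod (solve rows cols k mod)

-- ===== LEMMAS AND PROOFS =====

-- a matrix list is square of size n
def pvShape (n : Nat) (M : List (List Int)) : Prop :=
  M.length = n ∧ ∀ r ∈ M, r.length = n

-- the list matrix L has shape n and entrywise agrees mod m with the abstract matrix F
def pvRel (m : Int) (n : Nat) (L : List (List Int)) (F : Matrix (Fin n) (Fin n) ℤ) : Prop :=
  pvShape n L ∧ ∀ i j : Fin n, pvE L i j ≡ F i j [ZMOD m]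

-- the list vector v has length n and entrywise agrees mod m with w
def pvVRel (m : Int) (n : Nat) (v : List Int) (w : Fin n → ℤ) : Prop :=
  v.length = n ∧ ∀ i : Fin n, v.getD i 0 ≡ w i [ZMOD m]

theorem pvmod_modEq (a m : Int) : PySem.Int.mod a m ≡ a [ZMOD m] := by
  have h := PySem.Int.floordiv_mul_add_mod a m
  rw [Int.modEq_iff_dvd]
  exact ⟨PySem.Int.floordiv a m, by linarith⟩

theorem pv_dvd_bounds_zero {m d : Int} (hd : m ∣ d) (h1 : -|m| < d) (h2 : d < |m|) : d = 0 :=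
  Int.eq_zero_of_abs_lt_dvd ((abs_dvd _ _).mpr hd) (abs_lt.mpr ⟨h1, h2⟩)

theorem pvmod_eq_of_modEq {m a b : Int} (hm : m ≠ 0) (h : a ≡ b [ZMOD m]) :
    PySem.Int.mod a m = PySem.Int.mod b m := by
  have hc : PySem.Int.mod a m ≡ PySem.Int.mod b m [ZMOD m] :=
    ((pvmod_modEq a m).trans h).trans (pvmod_modEq b m).symm
  have hdvd : m ∣ PySem.Int.mod b m - PySem.Int.mod a m := hc.dvd
  have hz : PySem.Int.mod b m - PySem.Int.mod a m = 0 := by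
    rcases lt_or_gt_of_ne hm with hneg | hpos
    · have b1 := PySem.Int.mod_neg_bounds a hneg
      have b2 := PySem.Int.mod_neg_bounds b hneg
      exact pv_dvd_bounds_zero hdvd (by rw [abs_of_neg hneg]; omega)
        (by rw [abs_of_neg hneg]; omega)
    · have b1 := PySem.Int.mod_nonneg a hpos
      have b2 := PySem.Int.mod_lt a hpos
      have b3 := PySem.Int.mod_nonneg b hpos
      have b4 := PySem.Int.mod_lt b hpos
      exact pv_dvd_bounds_zero hdvd (by rw [abs_of_pos hpos]; omega)
        (by rw [abs_of_pos hpos]; omega)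
  omega

theorem pvmod_zero_left {m : Int} (hm : m ≠ 0) : PySem.Int.mod 0 m = 0 := by
  have hdvd : m ∣ PySem.Int.mod 0 m := Int.modEq_zero_iff_dvd.mp (pvmod_modEq 0 m)
  have key : -|m| < PySem.Int.mod 0 m ∧ PySem.Int.mod 0 m < |m| := by
    rcases lt_or_gt_of_ne hm with hneg | hpos
    · have b1 := PySem.Int.mod_neg_bounds 0 hneg
      rw [abs_of_neg hneg]; omega
    · have b1 := PySem.Int.mod_nonneg 0 hpos
      have b2 := PySem.Int.mod_lt 0 hpos
      rw [abs_of_pos hpos]; omega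
  exact pv_dvd_bounds_zero hdvd key.1 key.2

theorem pv_foldl_mod_sum {m : Int} (hm : m ≠ 0) :
    ∀ (xs : List Int) (a : Int),
      xs.foldl (fun acc x => PySem.Int.mod (acc + x) m) (PySem.Int.mod a m)
        = PySem.Int.mod (a + xs.sum) m := by
  intro xs
  induction xs with
  | nil => intro a; simp
  | cons x xs ih =>
    intro a
    have h1 : PySem.Int.mod (PySem.Int.mod a m + x) m = PySem.Int.mod (a + x) m :=
      pvmod_eq_of_modEq hm ((pvmod_modEq a m).add_right x)
    simp only [List.foldl_cons, h1, ih (a + x), List.sum_cons]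
    ring_nf

theorem pv_sum_range_modEq {m : Int} {n : Nat} {f g : Nat → Int}
    (h : ∀ i, i < n → f i ≡ g i [ZMOD m]) :
    ((List.range n).map f).sum ≡ ((List.range n).map g).sum [ZMOD m] := by
  induction n with
  | zero => rfl
  | succ t ih =>
    rw [List.range_succ, List.map_append, List.map_append, List.sum_append, List.sum_append]
    exact (ih (fun i hi => h i (Nat.lt_succ_of_lt hi))).add (by simpa using h t (Nat.lt_succ_self t))

theorem pv_list_sum_getD (v : List Int) :
    v.sum = ((List.range v.length).map (fun i => v.getD i 0)).sum := by
  induction v with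
  | nil => rfl
  | cons x v ih =>
    simp only [List.sum_cons, List.length_cons, List.range_succ_eq_map, List.map_cons,
      List.map_map, List.getD_cons_zero]
    have : ((List.range v.length).map (fun i => (x :: v).getD (Nat.succ i) 0))
        = (List.range v.length).map (fun i => v.getD i 0) := by
      apply List.map_congr_left; intro i _; rfl
    simp only [Function.comp_def, this, ih]

theorem pv_sum_range_eq_finset (n : Nat) (f : Nat → Int) :
    ((List.range n).map f).sum = ∑ i ∈ Finset.range n, f i := rfl

-- shape lemmas
theorem pvShape_replicate (n : Nat) : pvShape n (List.replicate n (List.replicate n (0:Int))) := by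
  refine ⟨List.length_replicate, fun r hr => ?_⟩
  rw [List.eq_of_mem_replicate hr]; exact List.length_replicate

theorem pvE_replicate (n i j : Nat) : pvE (List.replicate n (List.replicate n (0:Int))) i j = 0 := by
  simp only [pvE, List.getD, List.getElem?_replicate]
  split
  · simp [List.getElem?_replicate]; split <;> simp
  · simp

theorem pvShape_set2 {n : Nat} {M : List (List Int)} (h : pvShape n M) (i j : Nat) (x : Int) :
    pvShape n (pvSet2 M i j x) := by
  rcases Nat.lt_or_ge i M.length with hi | hi
  · refine ⟨by simp [pvSet2, h.1], fun r hr => ?_⟩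
    rcases List.mem_or_eq_of_mem_set hr with hmem | heq
    · exact h.2 r hmem
    · rw [heq, List.length_set, List.getD_eq_getElem _ _ hi]
      exact h.2 _ (List.getElem_mem hi)
  · rw [pvSet2, List.set_eq_of_length_le hi]; exact h

theorem pvE_set2_same {n : Nat} {M : List (List Int)} (h : pvShape n M)
    {i j : Nat} (hi : i < n) (hj : j < n) (x : Int) : pvE (pvSet2 M i j x) i j = x := by
  have hi' : i < M.length := h.1 ▸ hi
  have hrow : (M.getD i []).length = n := by
    rw [List.getD_eq_getElem _ _ hi']; exact h.2 _ (List.getElem_mem hi')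
  have hj' : j < (M.getD i []).length := hrow ▸ hj
  have h1 : (pvSet2 M i j x).getD i [] = (M.getD i []).set j x := by
    rw [pvSet2, List.getD_eq_getElem _ _ (by simpa using hi')]
    exact List.getElem_set_self (by simpa using hi')
  rw [pvE, h1, List.getD_eq_getElem _ _ (by simpa using hj')]
  exact List.getElem_set_self (by simpa using hj')

theorem pvE_set2_ne {M : List (List Int)} {i j i' j' : Nat} (h : i' ≠ i ∨ j' ≠ j) (x : Int) :
    pvE (pvSet2 M i j x) i' j' = pvE M i' j' := by
  by_cases hii : i' = i
  · subst hii
    have hne : j' ≠ j := by tauto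
    rcases Nat.lt_or_ge i' M.length with hi | hi
    · have h1 : (pvSet2 M i' j x).getD i' [] = (M.getD i' []).set j x := by
        rw [pvSet2, List.getD_eq_getElem _ _ (by simpa using hi)]
        exact List.getElem_set_self (by simpa using hi)
      rw [pvE, h1, pvE]
      simp only [List.getD_eq_getElem?_getD,
        List.getElem?_set_ne (show j ≠ j' from fun he => hne he.symm)]
    · have hno : pvSet2 M i' j x = M := by
        rw [pvSet2, List.set_eq_of_length_le hi]
      rw [hno]
  · have hne : i' ≠ i := hii
    simp only [pvE, pvSet2, List.getD_eq_getElem?_getD,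
      List.getElem?_set_ne (show i ≠ i' from fun he => hne he.symm)]

-- generic foldl invariant
theorem pv_foldl_inv {α β : Type} (inv : β → Prop) (f : β → α → β)
    (h : ∀ b a, inv b → inv (f b a)) : ∀ (l : List α) (b : β), inv b → inv (l.foldl f b) := by
  intro l
  induction l with
  | nil => intro b hb; exact hb
  | cons x xs ih => intro b hb; exact ih _ (h b x hb)

theorem pv_foldl_flatMap {α : Type} (l : List α) (g : α → List Int) (f : Int → Int → Int) (a : Int) :
    (l.flatMap g).foldl f a = l.foldl (fun a i => (g i).foldl f a) a := by
  induction l generalizing a with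
  | nil => rfl
  | cons x xs ih => rw [List.flatMap_cons, List.foldl_append, ih]; rfl

theorem pv_sum_flatMap {α : Type} (l : List α) (g : α → List Int) :
    (l.flatMap g).sum = (l.map (fun i => (g i).sum)).sum := by
  induction l with
  | nil => rfl
  | cons x xs ih => rw [List.flatMap_cons, List.sum_append, ih]; rfl

-- the inner jj-loop of mat_mul
def pvInnerF (LB : List (List Int)) (m : Int) (i kk : Nat) (a : Int) (t : Nat)
    (R : List (List Int)) : List (List Int) :=
  (List.range t).foldl
    (fun R jj => pvSet2 R i jj (PySem.Int.mod (pvE R i jj + a * pvE LB kk jj) m)) R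

theorem pvInnerF_spec {n : Nat} {m : Int} (LB : List (List Int)) (i kk : Nat) (a : Int)
    (hi : i < n) :
    ∀ (t : Nat), t ≤ n → ∀ (R : List (List Int)), pvShape n R →
      pvShape n (pvInnerF LB m i kk a t R)
      ∧ (∀ i' j', i' ≠ i → pvE (pvInnerF LB m i kk a t R) i' j' = pvE R i' j')
      ∧ (∀ j', j' < t →
          pvE (pvInnerF LB m i kk a t R) i j'
            = PySem.Int.mod (pvE R i j' + a * pvE LB kk j') m)
      ∧ (∀ j', t ≤ j' → pvE (pvInnerF LB m i kk a t R) i j' = pvE R i j') := by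
  intro t
  induction t with
  | zero => intro _ R hR; exact ⟨hR, fun _ _ _ => rfl, fun _ h => absurd h (Nat.not_lt_zero _), fun _ _ => rfl⟩
  | succ t ih =>
    intro ht R hR
    obtain ⟨sh, hrow, hdone, hpend⟩ := ih (Nat.le_of_succ_le ht) R hR
    have hstep : pvInnerF LB m i kk a (t+1) R
        = pvSet2 (pvInnerF LB m i kk a t R) i t
            (PySem.Int.mod (pvE (pvInnerF LB m i kk a t R) i t + a * pvE LB kk t) m) := by
      rw [pvInnerF, pvInnerF, List.range_succ, List.foldl_append, List.foldl_cons, List.foldl_nil]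
    have htn : t < n := ht
    refine ⟨?_, ?_, ?_, ?_⟩
    · rw [hstep]; exact pvShape_set2 sh _ _ _
    · intro i' j' hne
      rw [hstep, pvE_set2_ne (Or.inl hne)]; exact hrow i' j' hne
    · intro j' hj'
      rcases Nat.lt_or_ge j' t with hlt | hge
      · rw [hstep, pvE_set2_ne (Or.inr (Nat.ne_of_lt hlt))]; exact hdone j' hlt
      · have hj'e : j' = t := by omega
        subst hj'e
        rw [hstep, pvE_set2_same sh hi htn, hpend j' (Nat.le_refl _)]
    · intro j' hj'
      rw [hstep, pvE_set2_ne (Or.inr (by omega))]; exact hpend j' (by omega)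

-- the kk-loop of mat_mul (inner bound n fixed)
def pvKkF (LA LB : List (List Int)) (m : Int) (n i : Nat) (t : Nat)
    (R : List (List Int)) : List (List Int) :=
  (List.range t).foldl
    (fun R kk => if pvE LA i kk == 0 then R else pvInnerF LB m i kk (pvE LA i kk) n R) R

-- the per-entry accumulator that the kk-loop realises on row i
def pvRowAcc (LA LB : List (List Int)) (m : Int) (i jj : Nat) (t : Nat) (c : Int) : Int :=
  (List.range t).foldl
    (fun acc kk => if pvE LA i kk == 0 then acc
      else PySem.Int.mod (acc + pvE LA i kk * pvE LB kk jj) m) c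

theorem pvKkF_spec {n : Nat} {m : Int} (LA LB : List (List Int)) (i : Nat) (hi : i < n) :
    ∀ (t : Nat) (R : List (List Int)), pvShape n R →
      pvShape n (pvKkF LA LB m n i t R)
      ∧ (∀ i' j', i' ≠ i → pvE (pvKkF LA LB m n i t R) i' j' = pvE R i' j')
      ∧ (∀ jj, jj < n →
          pvE (pvKkF LA LB m n i t R) i jj = pvRowAcc LA LB m i jj t (pvE R i jj)) := by
  intro t
  induction t with
  | zero => intro R hR; exact ⟨hR, fun _ _ _ => rfl, fun _ _ => rfl⟩
  | succ t ih =>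
    intro R hR
    obtain ⟨sh, hrow, hacc⟩ := ih R hR
    have hstep : pvKkF LA LB m n i (t+1) R
        = (if pvE LA i t == 0 then pvKkF LA LB m n i t R
           else pvInnerF LB m i t (pvE LA i t) n (pvKkF LA LB m n i t R)) := by
      rw [pvKkF, pvKkF, List.range_succ, List.foldl_append, List.foldl_cons, List.foldl_nil]
    have haccstep : ∀ jj c, pvRowAcc LA LB m i jj (t+1) c
        = (if pvE LA i t == 0 then pvRowAcc LA LB m i jj t c
           else PySem.Int.mod (pvRowAcc LA LB m i jj t c + pvE LA i t * pvE LB t jj) m) := by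
      intro jj c
      rw [pvRowAcc, pvRowAcc, List.range_succ, List.foldl_append, List.foldl_cons, List.foldl_nil]
    cases hz : (pvE LA i t == 0) with
    | true =>
      rw [hstep, if_pos hz] at *
      refine ⟨sh, hrow, fun jj hjj => ?_⟩
      rw [haccstep, if_pos hz]; exact hacc jj hjj
    | false =>
      obtain ⟨sh2, hrow2, hdone2, _⟩ :=
        pvInnerF_spec (n := n) LB i t (pvE LA i t) hi n (Nat.le_refl n) _ sh
      rw [hstep, if_neg (by simp [hz])]
      refine ⟨sh2, ?_, ?_⟩
      · intro i' j' hne; rw [hrow2 i' j' hne]; exact hrow i' j' hne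
      · intro jj hjj
        rw [hdone2 jj hjj, haccstep, if_neg (by simp [hz]), hacc jj hjj]

theorem pvRowAcc_modEq {m : Int} (LA LB : List (List Int)) (i jj : Nat) :
    ∀ (t : Nat) (c : Int),
      pvRowAcc LA LB m i jj t c
        ≡ c + ((List.range t).map (fun kk => pvE LA i kk * pvE LB kk jj)).sum [ZMOD m] := by
  intro t
  induction t with
  | zero => intro c; simp [pvRowAcc, Int.ModEq.refl]
  | succ t ih =>
    intro c
    have hstep : pvRowAcc LA LB m i jj (t+1) c
        = (if pvE LA i t == 0 then pvRowAcc LA LB m i jj t c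
           else PySem.Int.mod (pvRowAcc LA LB m i jj t c + pvE LA i t * pvE LB t jj) m) := by
      rw [pvRowAcc, pvRowAcc, List.range_succ, List.foldl_append, List.foldl_cons, List.foldl_nil]
    rw [hstep, List.range_succ, List.map_append, List.sum_append]
    cases hz : (pvE LA i t == 0) with
    | true =>
      have hz' : pvE LA i t = 0 := by simpa using hz
      simp only [if_pos, List.map_cons, List.map_nil, List.sum_cons, List.sum_nil, hz',
        zero_mul, add_zero]
      exact ih c
    | false =>
      simp only [Bool.false_eq_true, if_false, List.map_cons, List.map_nil, List.sum_cons,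
        List.sum_nil, add_zero]
      calc PySem.Int.mod (pvRowAcc LA LB m i jj t c + pvE LA i t * pvE LB t jj) m
          ≡ pvRowAcc LA LB m i jj t c + pvE LA i t * pvE LB t jj [ZMOD m] := pvmod_modEq _ m
        _ ≡ c + ((List.range t).map (fun kk => pvE LA i kk * pvE LB kk jj)).sum
              + pvE LA i t * pvE LB t jj [ZMOD m] := (ih c).add_right _
        _ = c + (((List.range t).map (fun kk => pvE LA i kk * pvE LB kk jj)).sum
              + pvE LA i t * pvE LB t jj) := by ring

-- the matrix product entry congruence for A's mat_mul
theorem pvMatMul_rel {m : Int} {n : Nat} {LA LB : List (List Int)}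
    {FA FB : Matrix (Fin n) (Fin n) ℤ}
    (hA : pvRel m n LA FA) (hB : pvRel m n LB FB) :
    pvRel m n (pvMatMul LA LB m) (FA * FB) := by
  obtain ⟨⟨hlen, hrows⟩, hent⟩ := hA
  have hmm : pvMatMul LA LB m
      = (List.range n).foldl (fun R i => pvKkF LA LB m n i n R)
          (List.replicate n (List.replicate n 0)) := by
    rw [pvMatMul, hlen]; rfl
  -- outer loop invariant
  have houter : ∀ (t : Nat), t ≤ n →
      pvShape n ((List.range t).foldl (fun R i => pvKkF LA LB m n i n R)
        (List.replicate n (List.replicate n 0)))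
      ∧ (∀ i jj, i < n → jj < n →
          pvE ((List.range t).foldl (fun R i => pvKkF LA LB m n i n R)
            (List.replicate n (List.replicate n 0))) i jj
          = if i < t then pvRowAcc LA LB m i jj n 0 else 0) := by
    intro t
    induction t with
    | zero =>
      intro _
      refine ⟨pvShape_replicate n, fun i jj _ _ => ?_⟩
      simp [pvE_replicate]
    | succ t ih =>
      intro ht
      obtain ⟨sh, hprev⟩ := ih (Nat.le_of_succ_le ht)
      have htn : t < n := ht
      obtain ⟨sh2, hrow2, hacc2⟩ := pvKkF_spec (m := m) LA LB t htn n _ sh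
      have hstep : (List.range (t+1)).foldl (fun R i => pvKkF LA LB m n i n R)
            (List.replicate n (List.replicate n 0))
          = pvKkF LA LB m n t n ((List.range t).foldl (fun R i => pvKkF LA LB m n i n R)
            (List.replicate n (List.replicate n 0))) := by
        rw [List.range_succ, List.foldl_append, List.foldl_cons, List.foldl_nil]
      refine ⟨by rw [hstep]; exact sh2, fun i jj hin hjj => ?_⟩
      rw [hstep]
      by_cases hit : i = t
      · subst hit
        rw [hacc2 jj hjj, hprev i jj hin hjj, if_neg (by omega), if_pos (by omega)]
      · rw [hrow2 i jj hit, hprev i jj hin hjj]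
        by_cases hlt : i < t
        · rw [if_pos hlt, if_pos (by omega)]
        · rw [if_neg hlt, if_neg (by omega)]
  obtain ⟨shf, hentf⟩ := houter n (Nat.le_refl n)
  rw [hmm]
  refine ⟨shf, fun i j => ?_⟩
  rw [hentf i j i.isLt j.isLt, if_pos i.isLt]
  -- the dite-extended abstract summand
  have hg : ((List.range n).map (fun kk =>
        if h : kk < n then FA i ⟨kk, h⟩ * FB ⟨kk, h⟩ j else 0)).sum = (FA * FB) i j := by
    rw [pv_sum_range_eq_finset, Matrix.mul_apply, ← Fin.sum_univ_eq_sum_range]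
    apply Finset.sum_congr rfl
    intro x _
    simp [x.isLt]
  calc pvRowAcc LA LB m i j n 0
      ≡ 0 + ((List.range n).map (fun kk => pvE LA i kk * pvE LB kk j)).sum [ZMOD m] :=
        pvRowAcc_modEq LA LB i j n 0
    _ = ((List.range n).map (fun kk => pvE LA i kk * pvE LB kk j)).sum := zero_add _
    _ ≡ ((List.range n).map (fun kk =>
          if h : kk < n then FA i ⟨kk, h⟩ * FB ⟨kk, h⟩ j else 0)).sum [ZMOD m] := by
        apply pv_sum_range_modEq
        intro kk hkk
        rw [dif_pos hkk]
        exact (hent i ⟨kk, hkk⟩).mul (hB.2 ⟨kk, hkk⟩ j)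
    _ = (FA * FB) i j := hg

theorem pvIdentity_rel (m : Int) (n : Nat) :
    pvRel m n ((List.range n).map (fun i =>
      (List.range n).map (fun j => if i = j then (1:Int) else 0))) 1 := by
  refine ⟨⟨by simp, fun r hr => ?_⟩, fun i j => ?_⟩
  · obtain ⟨x, _, hx⟩ := List.mem_map.mp hr
    rw [← hx]; simp
  · rw [pvE, PySem.List.getD_map_range _ _ _ _ i.isLt, PySem.List.getD_map_range _ _ _ _ j.isLt]
    have : ((if (i:Nat) = (j:Nat) then (1:Int) else 0)) = (1 : Matrix (Fin n) (Fin n) ℤ) i j := by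
      rw [Matrix.one_apply]
      by_cases h : (i:Nat) = (j:Nat)
      · rw [if_pos h, if_pos (Fin.ext h)]
      · rw [if_neg h, if_neg (fun he => h (congrArg Fin.val he))]
    rw [this]

theorem pvMatPowGo_rel {m : Int} {n : Nat} :
    ∀ (p : Int) (R M : List (List Int)) (Rf Mf : Matrix (Fin n) (Fin n) ℤ),
      pvRel m n R Rf → pvRel m n M Mf →
      pvRel m n (pvMatPowGo R M p m) (Rf * Mf ^ p.toNat) := by
  suffices h : ∀ (N : Nat) (p : Int), p.toNat ≤ N →
      ∀ (R M : List (List Int)) (Rf Mf : Matrix (Fin n) (Fin n) ℤ),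
      pvRel m n R Rf → pvRel m n M Mf →
      pvRel m n (pvMatPowGo R M p m) (Rf * Mf ^ p.toNat) by
    intro p; exact h p.toNat p (Nat.le_refl _)
  intro N
  induction N with
  | zero =>
    intro p hp R M Rf Mf hR hM
    have hple : p ≤ 0 := by omega
    rw [pvMatPowGo, dif_neg (by omega), show p.toNat = 0 by omega, pow_zero, mul_one]
    exact hR
  | succ N ih =>
    intro p hp R M Rf Mf hR hM
    by_cases hpos : 0 < p
    · rw [pvMatPowGo, dif_pos hpos]
      have hsh : p >>> (1:Nat) = p / 2 := by
        simp [Int.shiftRight_eq_div_pow]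
      have hband : PySem.Int.band p 1 = p % 2 := by
        rw [PySem.Int.band_one, PySem.Int.mod_eq_emod_of_pos (by omega)]
      have hrec : (p >>> (1:Nat)).toNat ≤ N := by rw [hsh]; omega
      have hMM : pvRel m n (pvMatMul M M m) (Mf * Mf) := pvMatMul_rel hM hM
      rcases Int.emod_two_eq p with hpar | hpar
      · -- even
        rw [if_neg (by simp [hband, hpar])]
        have := ih (p >>> (1:Nat)) hrec R (pvMatMul M M m) Rf (Mf * Mf) hR hMM
        have hpow : (Mf * Mf) ^ (p >>> (1:Nat)).toNat = Mf ^ p.toNat := by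
          rw [← pow_two, ← pow_mul, hsh]
          congr 1
          omega
        rwa [hpow] at this
      · -- odd
        rw [if_pos (by simp [hband, hpar])]
        have hRM : pvRel m n (pvMatMul R M m) (Rf * Mf) := pvMatMul_rel hR hM
        have := ih (p >>> (1:Nat)) hrec (pvMatMul R M m) (pvMatMul M M m)
          (Rf * Mf) (Mf * Mf) hRM hMM
        have hpow : Rf * Mf * (Mf * Mf) ^ (p >>> (1:Nat)).toNat = Rf * Mf ^ p.toNat := by
          rw [← pow_two, ← pow_mul, hsh, mul_assoc, ← pow_succ']
          congr 2
          omega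
        rwa [hpow] at this
    · rw [pvMatPowGo, dif_neg hpos, show p.toNat = 0 by omega, pow_zero, mul_one]
      exact hR

theorem pvVecMat_rel {m : Int} {n : Nat} {v : List Int} {M : List (List Int)}
    {w : Fin n → ℤ} {F : Matrix (Fin n) (Fin n) ℤ}
    (hv : pvVRel m n v w) (hM : pvRel m n M F) :
    pvVRel m n (pvVecMat v M m) (Matrix.vecMul w F) := by
  obtain ⟨hlen, hent⟩ := hv
  have hvm : pvVecMat v M m = (List.range n).map (fun j =>
      PySem.Int.mod (((List.range n).map (fun i => v.getD i 0 * pvE M i j)).sum) m) := by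
    rw [pvVecMat, hlen]
  refine ⟨by rw [hvm]; simp, fun j => ?_⟩
  rw [hvm, PySem.List.getD_map_range _ _ _ _ j.isLt]
  have hg : ((List.range n).map (fun i =>
        if h : i < n then w ⟨i, h⟩ * F ⟨i, h⟩ j else 0)).sum = Matrix.vecMul w F j := by
    rw [pv_sum_range_eq_finset, ← Fin.sum_univ_eq_sum_range]
    have : Matrix.vecMul w F j = ∑ i, w i * F i j := by
      simp [Matrix.vecMul, dotProduct]
    rw [this]
    apply Finset.sum_congr rfl
    intro x _
    simp [x.isLt]
  calc PySem.Int.mod (((List.range n).map (fun i => v.getD i 0 * pvE M i j)).sum) m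
      ≡ ((List.range n).map (fun i => v.getD i 0 * pvE M i j)).sum [ZMOD m] := pvmod_modEq _ m
    _ ≡ ((List.range n).map (fun i =>
          if h : i < n then w ⟨i, h⟩ * F ⟨i, h⟩ j else 0)).sum [ZMOD m] := by
        apply pv_sum_range_modEq
        intro i hi
        rw [dif_pos hi]
        exact (hent ⟨i, hi⟩).mul (hM.2 ⟨i, hi⟩ j)
    _ = Matrix.vecMul w F j := hg

theorem pvMatSq_rel {m : Int} {n : Nat} {M : List (List Int)}
    {F : Matrix (Fin n) (Fin n) ℤ} (hM : pvRel m n M F) :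
    pvRel m n (pvMatSq M m) (F * F) := by
  obtain ⟨⟨hlen, _⟩, hent⟩ := hM
  have hsq : pvMatSq M m = (List.range n).map (fun i => (List.range n).map (fun j =>
      PySem.Int.mod (((List.range n).map (fun t => pvE M i t * pvE M t j)).sum) m)) := by
    rw [pvMatSq, hlen]
  refine ⟨⟨by rw [hsq]; simp, ?_⟩, fun i j => ?_⟩
  · intro r hr
    rw [hsq] at hr
    obtain ⟨x, _, hx⟩ := List.mem_map.mp hr
    rw [← hx]; simp
  · rw [hsq, pvE, PySem.List.getD_map_range _ _ _ _ i.isLt,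
      PySem.List.getD_map_range _ _ _ _ j.isLt]
    have hg : ((List.range n).map (fun t =>
          if h : t < n then F i ⟨t, h⟩ * F ⟨t, h⟩ j else 0)).sum = (F * F) i j := by
      rw [pv_sum_range_eq_finset, Matrix.mul_apply, ← Fin.sum_univ_eq_sum_range]
      apply Finset.sum_congr rfl
      intro x _
      simp [x.isLt]
    calc PySem.Int.mod (((List.range n).map (fun t => pvE M i t * pvE M t j)).sum) m
        ≡ ((List.range n).map (fun t => pvE M i t * pvE M t j)).sum [ZMOD m] := pvmod_modEq _ m
      _ ≡ ((List.range n).map (fun t =>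
            if h : t < n then F i ⟨t, h⟩ * F ⟨t, h⟩ j else 0)).sum [ZMOD m] := by
          apply pv_sum_range_modEq
          intro t ht
          rw [dif_pos ht]
          exact (hent i ⟨t, ht⟩).mul (hent ⟨t, ht⟩ j)
      _ = (F * F) i j := hg

theorem pvPowApply_rel {m : Int} {n : Nat} :
    ∀ (p : Int) (v : List Int) (M : List (List Int)) (w : Fin n → ℤ)
      (F : Matrix (Fin n) (Fin n) ℤ),
      pvVRel m n v w → pvRel m n M F →
      pvVRel m n (pvPowApply v M p m) (Matrix.vecMul w (F ^ p.toNat)) := by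
  suffices h : ∀ (N : Nat) (p : Int), p.toNat ≤ N →
      ∀ (v : List Int) (M : List (List Int)) (w : Fin n → ℤ) (F : Matrix (Fin n) (Fin n) ℤ),
      pvVRel m n v w → pvRel m n M F →
      pvVRel m n (pvPowApply v M p m) (Matrix.vecMul w (F ^ p.toNat)) by
    intro p; exact h p.toNat p (Nat.le_refl _)
  intro N
  induction N with
  | zero =>
    intro p hp v M w F hv hM
    rw [pvPowApply, dif_pos (by omega), show p.toNat = 0 by omega, pow_zero, Matrix.vecMul_one]
    exact hv
  | succ N ih =>
    intro p hp v M w F hv hM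
    by_cases hpos : p ≤ 0
    · rw [pvPowApply, dif_pos hpos, show p.toNat = 0 by omega, pow_zero, Matrix.vecMul_one]
      exact hv
    · rw [pvPowApply, dif_neg hpos]
      have hsh : p >>> (1:Nat) = p / 2 := by
        simp [Int.shiftRight_eq_div_pow]
      have hband : PySem.Int.band p 1 = p % 2 := by
        rw [PySem.Int.band_one, PySem.Int.mod_eq_emod_of_pos (by omega)]
      have hrec : (p >>> (1:Nat)).toNat ≤ N := by rw [hsh]; omega
      have hMM : pvRel m n (pvMatSq M m) (F * F) := pvMatSq_rel hM
      rcases Int.emod_two_eq p with hpar | hpar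
      · rw [if_neg (by simp [hband, hpar])]
        have := ih (p >>> (1:Nat)) hrec v (pvMatSq M m) w (F * F) hv hMM
        have hpow : (F * F) ^ (p >>> (1:Nat)).toNat = F ^ p.toNat := by
          rw [← pow_two, ← pow_mul, hsh]
          congr 1
          omega
        rwa [hpow] at this
      · rw [if_pos (by simp [hband, hpar])]
        have hvF : pvVRel m n (pvVecMat v M m) (Matrix.vecMul w F) := pvVecMat_rel hv hM
        have := ih (p >>> (1:Nat)) hrec (pvVecMat v M m) (pvMatSq M m)
          (Matrix.vecMul w F) (F * F) hvF hMM
        have hpow : Matrix.vecMul (Matrix.vecMul w F) ((F * F) ^ (p >>> (1:Nat)).toNat)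
            = Matrix.vecMul w (F ^ p.toNat) := by
          rw [Matrix.vecMul_vecMul, ← pow_two, ← pow_mul, hsh, ← pow_succ']
          congr 2
          omega
        rwa [hpow] at this

theorem pvBuildT_shape (vc : List (List Int)) (rows : Int) :
    pvShape vc.length (pvBuildT vc rows) := by
  rw [pvBuildT]
  apply pv_foldl_inv (inv := pvShape vc.length)
  · intro T i hT
    apply pv_foldl_inv (inv := pvShape vc.length)
    · intro T j hT2
      split
      · exact pvShape_set2 hT2 _ _ _
      · exact hT2
    · exact hT
  · exact pvShape_replicate _

-- the computational heart: A's summed matrix power equals B's summed vector power, mod m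
theorem pv_main {m : Int} (hm : m ≠ 0) (n : Nat) (T : List (List Int)) (hT : pvShape n T)
    (p : Int) :
    (List.range n).foldl (fun ans i => (List.range n).foldl
      (fun ans j => PySem.Int.mod (ans + pvE (pvMatPowGo ((List.range n).map (fun i =>
        (List.range n).map (fun j => if i = j then (1:Int) else 0))) T p m) i j) m) ans) 0
    = PySem.Int.mod (pvPowApply (List.replicate n 1) T p m).sum m := by
  set Tf : Matrix (Fin n) (Fin n) ℤ := Matrix.of (fun i j => pvE T i.val j.val) with hTf
  have hTrel : pvRel m n T Tf := ⟨hT, fun i j => Int.ModEq.refl _⟩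
  have hTn := pvMatPowGo_rel p _ T 1 Tf (pvIdentity_rel m n) hTrel
  rw [one_mul] at hTn
  set Tn := pvMatPowGo ((List.range n).map (fun i =>
    (List.range n).map (fun j => if i = j then (1:Int) else 0))) T p m with hTnd
  set v := pvPowApply (List.replicate n 1) T p m with hvd
  have hones : pvVRel m n (List.replicate n 1) (fun _ => (1:ℤ)) := by
    refine ⟨List.length_replicate, fun i => ?_⟩
    rw [List.getD_eq_getElem _ _ (by simp)]
    simp
  have hv := pvPowApply_rel p (List.replicate n 1) T (fun _ => (1:ℤ)) Tf hones hTrel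
  -- the common abstract entry, extended to ℕ × ℕ
  set pt := p.toNat with hptd
  set G : Nat → Nat → ℤ := fun i j =>
    if h : i < n ∧ j < n then (Tf ^ pt) ⟨i, h.1⟩ ⟨j, h.2⟩ else 0 with hG
  -- LHS = mod (sum of all entries of Tn) m
  have hL : (List.range n).foldl (fun ans i => (List.range n).foldl
        (fun ans j => PySem.Int.mod (ans + pvE Tn i j) m) ans) 0
      = PySem.Int.mod (((List.range n).flatMap
          (fun i => (List.range n).map (fun j => pvE Tn i j))).sum) m := by
    have h2 : (List.range n).foldl (fun ans i => (List.range n).foldl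
          (fun ans j => PySem.Int.mod (ans + pvE Tn i j) m) ans) 0
        = ((List.range n).flatMap (fun i => (List.range n).map (fun j => pvE Tn i j))).foldl
            (fun ans x => PySem.Int.mod (ans + x) m) 0 := by
      rw [pv_foldl_flatMap]
      simp only [List.foldl_map]
    rw [h2, ← pvmod_zero_left hm, pv_foldl_mod_sum hm, zero_add]
  rw [hL]
  -- both raw sums are congruent to the double sum of G
  have hSA : ((List.range n).flatMap (fun i => (List.range n).map (fun j => pvE Tn i j))).sum
      ≡ ((List.range n).map (fun i => ((List.range n).map (fun j => G i j)).sum)).sum [ZMOD m] := by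
    rw [pv_sum_flatMap]
    apply pv_sum_range_modEq
    intro i hi
    apply pv_sum_range_modEq
    intro j hj
    have := hTn.2 ⟨i, hi⟩ ⟨j, hj⟩
    simp only [hG, and_true, hi, hj, dif_pos] at this ⊢
    exact this
  have hSB : v.sum
      ≡ ((List.range n).map (fun j => ((List.range n).map (fun i => G i j)).sum)).sum [ZMOD m] := by
    rw [pv_list_sum_getD v, hv.1]
    apply pv_sum_range_modEq
    intro j hj
    have h1 : v.getD j 0 ≡ Matrix.vecMul (fun _ => (1:ℤ)) (Tf ^ pt) ⟨j, hj⟩ [ZMOD m] :=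
      hv.2 ⟨j, hj⟩
    have h2 : Matrix.vecMul (fun _ => (1:ℤ)) (Tf ^ pt) ⟨j, hj⟩
        = ((List.range n).map (fun i => G i j)).sum := by
      have hvm : Matrix.vecMul (fun _ => (1:ℤ)) (Tf ^ pt) ⟨j, hj⟩
          = ∑ i, (1:ℤ) * (Tf ^ pt) i ⟨j, hj⟩ := by
        simp [Matrix.vecMul, dotProduct]
      rw [hvm, pv_sum_range_eq_finset, ← Fin.sum_univ_eq_sum_range]
      apply Finset.sum_congr rfl
      intro x _
      simp [hG, x.isLt, hj]
    rw [h2] at h1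
    exact h1
  -- the two double sums of G coincide (Fubini)
  have hswap : ((List.range n).map (fun i => ((List.range n).map (fun j => G i j)).sum)).sum
      = ((List.range n).map (fun j => ((List.range n).map (fun i => G i j)).sum)).sum := by
    rw [pv_sum_range_eq_finset, pv_sum_range_eq_finset]
    rw [Finset.sum_congr rfl (fun i _ => pv_sum_range_eq_finset n (fun j => G i j)),
      Finset.sum_congr rfl (fun j _ => pv_sum_range_eq_finset n (fun i => G i j))]
    exact Finset.sum_comm
  apply pvmod_eq_of_modEq hm
  exact (hSA.trans (by rw [hswap])).trans hSB.symm

-- ===== VERDICT (by name: the statement is the Claim_ definition above) =====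
theorem solve_spec : Claim_equal_solve := by
  intro rows cols k mod _ hpre
  obtain ⟨_, hm⟩ := hpre
  show solve rows cols k mod = solve_alt rows cols k mod
  have hT := pvBuildT_shape (pvValidCols rows k) rows
  have hlen : (pvBuildT (pvValidCols rows k) rows).length = (pvValidCols rows k).length :=
    hT.1
  have hA : solve rows cols k mod
      = (List.range (pvValidCols rows k).length).foldl (fun ans i =>
          (List.range (pvValidCols rows k).length).foldl
            (fun ans j => PySem.Int.mod (ans +
              pvE (pvMatPowGo ((List.range (pvValidCols rows k).length).map (fun i =>
                (List.range (pvValidCols rows k).length).map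
                  (fun j => if i = j then (1:Int) else 0)))
                (pvBuildT (pvValidCols rows k) rows) (cols - 1) mod) i j) mod) ans) 0 := by
    rw [solve, pvMatPow, hlen]
  have hB : solve_alt rows cols k mod
      = PySem.Int.mod (pvPowApply (List.replicate (pvValidCols rows k).length 1)
          (pvBuildT (pvValidCols rows k) rows) (cols - 1) mod).sum mod := rfl
  rw [hA, hB]
  exact pv_main hm (pvValidCols rows k).length (pvBuildT (pvValidCols rows k) rows) hT (cols - 1)
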